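-- pv_equiv track=rewrite | github.com/ssongjj/studycodingtest | 프로그래머스/lv1/67256. ［카카오 인턴］ 키패드 누르기/［카카오 인턴］ 키패드 누르기.py | solution
-- ===== SOURCE A (Python) =====
-- def check_center(cur, num, hand):
--     distance_dic = {2: {0: 3, 1: 1, 2: 0, 3: 1, 4: 2, 5: 1, 6: 2, 7: 3, 8: 2, 9: 3, "*": 4, "#": 4}
--         , 5: {0: 2, 1: 2, 2: 1, 3: 2, 4: 1, 5: 0, 6: 1, 7: 2, 8: 1, 9: 2, "*": 3, "#": 3}
--         , 8: {0: 1, 1: 3, 2: 2, 3: 3, 4: 2, 5: 1, 6: 2, 7: 1, 8: 0, 9: 1, "*": 2, "#": 2}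
--         , 0: {0: 0, 1: 4, 2: 3, 3: 4, 4: 3, 5: 2, 6: 3, 7: 2, 8: 1, 9: 2, "*": 1, "#": 1}}
--
--     if distance_dic[num][cur[0]] < distance_dic[num][cur[1]]:
--         cur[0] = num
--         return 'L', cur
--     elif distance_dic[num][cur[0]] > distance_dic[num][cur[1]]:
--         cur[1] = num
--         return 'R', cur
--     else:
--         if hand == "right":
--             cur[1] = num
--             return 'R', cur
--         else:
--             cur[0] = num
--             return 'L', cur
--
-- def solution(numbers, hand):
--     answer = ''
--     cur = ["*", "#"]
--
--     for num in numbers: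
--         if num in (1, 4, 7):
--             answer += 'L'
--             cur[0] = num
--         elif num in (3, 6, 9):
--             answer += 'R'
--             cur[1] = num
--         else:
--             s, cur = check_center(cur, num, hand)
--             answer += s
--
--     return answer
-- ===== SOURCE B (Python) =====
-- def solution(numbers, hand):
--     # Recursive formulation: keys are classified arithmetically (n % 3), key
--     # coordinates come from divmod, and the answer string is built by prepending
--     # the chosen letter in front of the recursive result.
--     def pos(k):
--         return (3, 1) if k == 0 else divmod(k - 1, 3)
--
--     def go(nums, l, r):
--         if not nums:
--             return ''
--         n, rest = nums[0], nums[1:]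
--         if n % 3 == 1:                      # 1, 4, 7: left column
--             return 'L' + go(rest, pos(n), r)
--         if n % 3 == 0 and n != 0:           # 3, 6, 9: right column
--             return 'R' + go(rest, l, pos(n))
--         p = pos(n)                          # 2, 5, 8, 0: middle column
--         dl = abs(l[0] - p[0]) + abs(l[1] - p[1])
--         dr = abs(r[0] - p[0]) + abs(r[1] - p[1])
--         if dr < dl or (dr == dl and hand == 'right'):
--             return 'R' + go(rest, l, p)
--         return 'L' + go(rest, p, r)
--
--     return go(numbers, (3, 0), (3, 2))
-- ===== Notes on version B (the rewrite author's own statement) =====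
-- stated objective: alternative
-- what changed: B replaces A's iterative fold over four hand-written distance dictionaries by a recursive function that prepends each letter to the recursive result, classifies keys arithmetically by n % 3, and derives key coordinates with divmod to compare Manhattan distances with a single right-hand condition.
import Mathlib
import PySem

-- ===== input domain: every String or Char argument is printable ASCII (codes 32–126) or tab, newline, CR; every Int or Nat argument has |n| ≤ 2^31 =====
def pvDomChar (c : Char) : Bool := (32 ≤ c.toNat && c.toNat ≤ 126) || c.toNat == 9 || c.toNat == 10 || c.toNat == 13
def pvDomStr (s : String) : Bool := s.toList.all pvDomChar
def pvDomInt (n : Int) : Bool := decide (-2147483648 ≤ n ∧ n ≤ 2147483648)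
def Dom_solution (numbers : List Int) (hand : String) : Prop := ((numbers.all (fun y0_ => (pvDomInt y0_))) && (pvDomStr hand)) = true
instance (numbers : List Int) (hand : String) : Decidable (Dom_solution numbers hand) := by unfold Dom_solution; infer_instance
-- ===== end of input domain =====

-- B replaces A's iterative fold over four hand-written distance dictionaries by a
-- recursive function prepending letters, classifying keys by n % 3 and deriving
-- coordinates with divmod (alternative decomposition, same cost).

-- ===== PORT A =====
-- Python's dict keys mix ints and the strings '*' / '#'; keys are encoded as Int
-- with '*' ↦ -1 and '#' ↦ -2.  Rows of distance_dic for num ∉ {2,5,8,0} are a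
-- KeyError in Python: those inputs are excluded by Pre_solution below.
def distA (num k : Int) : Int :=
  if num = 2 then
    if k = 0 then 3 else if k = 1 then 1 else if k = 2 then 0 else if k = 3 then 1
    else if k = 4 then 2 else if k = 5 then 1 else if k = 6 then 2 else if k = 7 then 3
    else if k = 8 then 2 else if k = 9 then 3 else 4
  else if num = 5 then
    if k = 0 then 2 else if k = 1 then 2 else if k = 2 then 1 else if k = 3 then 2
    else if k = 4 then 1 else if k = 5 then 0 else if k = 6 then 1 else if k = 7 then 2
    else if k = 8 then 1 else if k = 9 then 2 else 3
  else if num = 8 then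
    if k = 0 then 1 else if k = 1 then 3 else if k = 2 then 2 else if k = 3 then 3
    else if k = 4 then 2 else if k = 5 then 1 else if k = 6 then 2 else if k = 7 then 1
    else if k = 8 then 0 else if k = 9 then 1 else 2
  else
    if k = 0 then 0 else if k = 1 then 4 else if k = 2 then 3 else if k = 3 then 4
    else if k = 4 then 3 else if k = 5 then 2 else if k = 6 then 3 else if k = 7 then 2
    else if k = 8 then 1 else if k = 9 then 2 else 1

def check_center (cur : Int × Int) (num : Int) (hand : String) : String × (Int × Int) :=
  if distA num cur.1 < distA num cur.2 then ("L", (num, cur.2))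
  else if distA num cur.1 > distA num cur.2 then ("R", (cur.1, num))
  else if hand = "right" then ("R", (cur.1, num))
  else ("L", (num, cur.2))

-- the body of A's for-loop, as a step function over (answer, cur)
def stepA (hand : String) (st : String × Int × Int) (num : Int) : String × Int × Int :=
  if num = 1 ∨ num = 4 ∨ num = 7 then (st.1 ++ "L", num, st.2.2)
  else if num = 3 ∨ num = 6 ∨ num = 9 then (st.1 ++ "R", st.2.1, num)
  else
    let sc := check_center (st.2.1, st.2.2) num hand
    (st.1 ++ sc.1, sc.2.1, sc.2.2)

def solution (numbers : List Int) (hand : String) : String :=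
  (numbers.foldl (stepA hand) ("", -1, -2)).1

-- ===== PORT B =====
-- Source B's pos helper: (3,1) for 0, else divmod(k-1, 3)
def posOf (k : Int) : Int × Int :=
  if k = 0 then (3, 1) else (PySem.Int.floordiv (k - 1) 3, PySem.Int.mod (k - 1) 3)

-- Source B's recursive go, prepending each letter to the recursive result
def goB (hand : String) : List Int → Int × Int → Int × Int → String
  | [], _, _ => ""
  | n :: rest, l, r =>
    if PySem.Int.mod n 3 = 1 then "L" ++ goB hand rest (posOf n) r
    else if PySem.Int.mod n 3 = 0 ∧ n ≠ 0 then "R" ++ goB hand rest l (posOf n)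
    else
      let p := posOf n
      let dl := |l.1 - p.1| + |l.2 - p.2|
      let dr := |r.1 - p.1| + |r.2 - p.2|
      if dr < dl ∨ (dr = dl ∧ hand = "right") then "R" ++ goB hand rest l p
      else "L" ++ goB hand rest p r

def solution_alt (numbers : List Int) (hand : String) : String :=
  goB hand numbers (3, 0) (3, 2)

-- ===== PRECONDITION & SPEC =====
-- Pre_ excludes numbers outside 0‥9, on which Python A raises KeyError in check_center.
def Pre_solution (numbers : List Int) (hand : String) : Prop :=
  ∀ n ∈ numbers, 0 ≤ n ∧ n ≤ 9

instance (numbers : List Int) (hand : String) : Decidable (Pre_solution numbers hand) := by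
  unfold Pre_solution; infer_instance

def pvWitness_solution : List Int × String := ([1, 3, 4, 5, 8, 2, 1, 4, 5, 9, 5], "right")

def Spec_solution (numbers : List Int) (hand : String) (out : String) : Prop := out = solution_alt numbers hand
instance (numbers : List Int) (hand : String) (out : String) : Decidable (Spec_solution numbers hand out) := by unfold Spec_solution; infer_instance

-- ===== CLAIM (what is proved, stated in full; the proofs are below) =====
def Claim_equal_solution : Prop := ∀ (numbers : List Int) (hand : String), Dom_solution numbers hand → Pre_solution numbers hand → Spec_solution numbers hand (solution numbers hand)

-- ===== LEMMAS AND PROOFS =====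

-- position of an A-side key (keys only; '*' ↦ -1 starts at (3,0), '#' ↦ -2 at (3,2))
def posKey (k : Int) : Int × Int :=
  if k = -1 then (3, 0) else if k = -2 then (3, 2) else posOf k

-- A's tables are the Manhattan distances between B's coordinates, on all 12 valid keys.
lemma dist_eq (num k : Int) (h2 : num = 0 ∨ num = 2 ∨ num = 5 ∨ num = 8)
    (hk1 : -2 ≤ k) (hk2 : k ≤ 9) :
    distA num k = |(posKey k).1 - (posKey num).1| + |(posKey k).2 - (posKey num).2| := by
  rcases h2 with h | h | h | h <;> subst h <;> interval_cases k <;> decide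

lemma loop_agree (numbers : List Int) (hand : String) (acc : String) (l r : Int)
    (hl1 : -2 ≤ l) (hl2 : l ≤ 9) (hr1 : -2 ≤ r) (hr2 : r ≤ 9)
    (hp : ∀ n ∈ numbers, 0 ≤ n ∧ n ≤ 9) :
    (numbers.foldl (stepA hand) (acc, l, r)).1
      = acc ++ goB hand numbers (posKey l) (posKey r) := by
  induction numbers generalizing acc l r with
  | nil => simp [goB]
  | cons n rest ih =>
    obtain ⟨hn1, hn2⟩ := hp n (List.mem_cons_self ..)
    have hp' : ∀ m ∈ rest, 0 ≤ m ∧ m ≤ 9 := fun m hm => hp m (List.mem_cons_of_mem _ hm)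
    have hpos : posKey n = posOf n := by
      unfold posKey; rw [if_neg (by omega), if_neg (by omega)]
    simp only [List.foldl_cons]
    by_cases hL : n = 1 ∨ n = 4 ∨ n = 7
    · have hm : PySem.Int.mod n 3 = 1 := by rcases hL with h|h|h <;> subst h <;> decide
      rw [show stepA hand (acc, l, r) n = (acc ++ "L", n, r) by simp [stepA, hL],
        show goB hand (n :: rest) (posKey l) (posKey r)
          = "L" ++ goB hand rest (posOf n) (posKey r) by simp only [goB]; rw [if_pos hm]]
      rw [← hpos, ih (acc ++ "L") n r (by omega) (by omega) hr1 hr2 hp',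
        String.append_assoc]
    · by_cases hR : n = 3 ∨ n = 6 ∨ n = 9
      · have hm1 : ¬ PySem.Int.mod n 3 = 1 := by rcases hR with h|h|h <;> subst h <;> decide
        have hm0 : PySem.Int.mod n 3 = 0 ∧ n ≠ 0 := by
          rcases hR with h|h|h <;> subst h <;> exact ⟨by decide, by decide⟩
        rw [show stepA hand (acc, l, r) n = (acc ++ "R", l, n) by simp [stepA, hL, hR],
          show goB hand (n :: rest) (posKey l) (posKey r)
            = "R" ++ goB hand rest (posKey l) (posOf n) by
              simp only [goB]; rw [if_neg hm1, if_pos hm0]]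
        rw [← hpos, ih (acc ++ "R") l n hl1 hl2 (by omega) (by omega) hp',
          String.append_assoc]
      · -- center column: n ∈ {0, 2, 5, 8}
        have hc : n = 0 ∨ n = 2 ∨ n = 5 ∨ n = 8 := by omega
        have hm1 : ¬ PySem.Int.mod n 3 = 1 := by rcases hc with h|h|h|h <;> subst h <;> decide
        have hm0 : ¬ (PySem.Int.mod n 3 = 0 ∧ n ≠ 0) := by
          rcases hc with h|h|h|h <;> subst h <;> simp [PySem.Int.mod] <;> decide
        have hdl : distA n l = |(posKey l).1 - (posKey n).1| + |(posKey l).2 - (posKey n).2| :=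
          dist_eq n l hc hl1 hl2
        have hdr : distA n r = |(posKey r).1 - (posKey n).1| + |(posKey r).2 - (posKey n).2| :=
          dist_eq n r hc hr1 hr2
        by_cases hcond : distA n r < distA n l ∨ (distA n r = distA n l ∧ hand = "right")
        · have hA : stepA hand (acc, l, r) n = (acc ++ "R", l, n) := by
            simp only [stepA, if_neg hL, if_neg hR, check_center]
            rcases hcond with h | ⟨h, hh⟩
            · rw [if_neg (by omega), if_pos (by omega)]
            · rw [if_neg (by omega), if_neg (by omega), if_pos hh]
          have hB : goB hand (n :: rest) (posKey l) (posKey r)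
              = "R" ++ goB hand rest (posKey l) (posOf n) := by
            simp only [goB]
            rw [hdl, hdr, hpos] at hcond
            rw [if_neg hm1, if_neg hm0, if_pos hcond]
          rw [hA, hB, ← hpos, ih (acc ++ "R") l n hl1 hl2 (by omega) (by omega) hp',
            String.append_assoc]
        · push_neg at hcond
          obtain ⟨hle, him⟩ := hcond
          have hA : stepA hand (acc, l, r) n = (acc ++ "L", n, r) := by
            simp only [stepA, if_neg hL, if_neg hR, check_center]
            by_cases heq : distA n l = distA n r
            · rw [if_neg (by omega), if_neg (by omega), if_neg (him heq.symm)]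
            · rw [if_pos (by omega)]
          have hB : goB hand (n :: rest) (posKey l) (posKey r)
              = "L" ++ goB hand rest (posOf n) (posKey r) := by
            simp only [goB]
            rw [hdl, hdr, hpos] at hle him
            have hnc : ¬ (|(posKey r).1 - (posOf n).1| + |(posKey r).2 - (posOf n).2| <
                  |(posKey l).1 - (posOf n).1| + |(posKey l).2 - (posOf n).2| ∨
                |(posKey r).1 - (posOf n).1| + |(posKey r).2 - (posOf n).2| =
                    |(posKey l).1 - (posOf n).1| + |(posKey l).2 - (posOf n).2| ∧
                  hand = "right") := by
              rintro (h | ⟨h, hh⟩)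
              · exact absurd h (not_lt.mpr hle)
              · exact him h hh
            rw [if_neg hm1, if_neg hm0, if_neg hnc]
          rw [hA, hB, ← hpos, ih (acc ++ "L") n r (by omega) (by omega) hr1 hr2 hp',
            String.append_assoc]

-- ===== VERDICT (by name: the statement is the Claim_ definition above) =====
theorem solution_spec : Claim_equal_solution := by
  intro numbers hand _ hpre
  unfold Spec_solution solution solution_alt
  have := loop_agree numbers hand "" (-1) (-2) (by omega) (by omega) (by omega) (by omega) hpre
  simpa [posKey] using this
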